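-- pv_equiv track=rewrite | github.com/Mister-Teapot/OriC_Finder | oriC_Finder_v3.py | get_connected_groups
-- ===== SOURCE A (Python) =====
-- def get_connected_groups(peaks, adj_mat, threshold):
--     visited = [False] * len(peaks)
--     connected_groups_idx = []
--     for i in range(len(peaks)):
--         if not visited[i]:
--             group = []
--             _, _, visited, group, _ = _DFS_recurse(i, adj_mat, visited, group, threshold=threshold)
--             connected_groups_idx.append(group)
--     connected_groups_vals = [ [peaks[i] for i in idx_group] for idx_group in connected_groups_idx ]
--     return connected_groups_vals
--
-- def _DFS_recurse(idx, adj_mat, visited, connected_list, threshold):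
--     visited[idx] = True
--     connected_list.append(idx)
--     for i in range(len(visited)):
--         if i == idx:
--             continue
--         elif adj_mat[i][idx] <= threshold and not visited[i]:
--             _, _, visited, connected_list, _ = _DFS_recurse(i,adj_mat,visited, connected_list, threshold)
--     return idx, adj_mat, visited, connected_list, threshold
-- ===== SOURCE B (Python) =====
-- def get_connected_groups(peaks, adj_mat, threshold):
--     n = len(peaks)
--     visited = [False] * n
--     groups = []
--     for start in range(n):
--         if visited[start]:
--             continue
--         group = []
--         stack = [start]
--         while stack:
--             node = stack.pop()
--             if visited[node]:
--                 continue
--             visited[node] = True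
--             group.append(node)
--             neighbors = [j for j in range(n) if j != node and adj_mat[j][node] <= threshold]
--             stack.extend(reversed(neighbors))
--         groups.append([peaks[i] for i in group])
--     return groups
-- ===== Notes on version B (the rewrite author's own statement) =====
-- stated objective: alternative
-- what changed: Replaces the recursive DFS helper (_DFS_recurse) with an iterative DFS over an explicit stack (neighbors pushed in descending index order, visited checked at pop), collecting each group's peak values as the component finishes instead of in a final mapping pass.
-- outside the precondition, e.g. on get_connected_groups([1, 2], [[0, 0], [0]], 0): A returns [[1, 2]], B returns [[1, 2]]
import Mathlib
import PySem

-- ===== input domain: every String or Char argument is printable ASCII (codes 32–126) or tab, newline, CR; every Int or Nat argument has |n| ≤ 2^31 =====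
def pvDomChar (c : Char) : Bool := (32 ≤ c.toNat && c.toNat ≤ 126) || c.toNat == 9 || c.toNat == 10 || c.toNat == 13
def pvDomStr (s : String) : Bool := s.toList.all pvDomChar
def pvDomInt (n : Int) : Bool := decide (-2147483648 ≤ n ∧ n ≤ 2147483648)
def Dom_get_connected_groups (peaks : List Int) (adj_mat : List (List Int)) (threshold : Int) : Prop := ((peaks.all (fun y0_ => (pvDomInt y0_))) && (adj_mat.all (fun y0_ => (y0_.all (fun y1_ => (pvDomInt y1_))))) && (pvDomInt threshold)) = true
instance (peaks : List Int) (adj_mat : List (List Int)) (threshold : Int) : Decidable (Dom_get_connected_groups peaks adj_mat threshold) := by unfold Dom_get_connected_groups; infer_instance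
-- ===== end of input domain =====

-- B replaces A's recursive DFS helper by an iterative explicit-stack DFS
-- (alternative decomposition, same cost); the claim is about return values.

-- ===== PORT A =====
-- adj_mat[i][idx] <= threshold (indices in range on Pre_; getD defaults never reached there)
def pvAdjle (adj : List (List Int)) (thr : Int) (i x : Nat) : Bool :=
  decide ((adj.getD i []).getD x 0 ≤ thr)

-- literal port of _DFS_recurse: mark idx, append it, then for i in range(n):
-- skip i = idx, recurse on close unvisited i.  The fuel argument only makes the
-- recursion structural (never exhausted: the recursion depth is ≤ #unvisited).
def pvDfsA (adj : List (List Int)) (thr : Int) (n : Nat) :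
    Nat → Nat → (List Bool × List Nat) → (List Bool × List Nat)
  | 0, _, vg => vg
  | f + 1, idx, vg =>
    (List.range n).foldl
      (fun vg i =>
        if i = idx then vg
        else if pvAdjle adj thr i idx ∧ vg.1.getD i true = false then
          pvDfsA adj thr n f i vg
        else vg)
      (vg.1.set idx true, vg.2 ++ [idx])

def get_connected_groups (peaks : List Int) (adj_mat : List (List Int)) (threshold : Int) : List (List Int) :=
  let n := peaks.length
  let st :=
    (List.range n).foldl
      (fun (st : List Bool × List (List Nat)) i =>
        if st.1.getD i true = false then
          let r := pvDfsA adj_mat threshold n (n + 1) i (st.1, [])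
          (r.1, st.2 ++ [r.2])
        else st)
      (List.replicate n false, [])
  st.2.map (fun grp => grp.map (fun i => peaks.getD i 0))

-- ===== PORT B =====
def pvCountFalse (v : List Bool) : Nat := v.count false

-- termination helper for pvStackLoop (cited by its decreasing_by)
theorem pvCountFalse_set_lt (v : List Bool) (x : Nat) (h : v.getD x true = false) :
    pvCountFalse (v.set x true) < pvCountFalse v := by
  induction v generalizing x with
  | nil => simp [List.getD] at h
  | cons b t ih =>
    cases x with
    | zero =>
      simp [List.getD] at h
      simp [pvCountFalse, h]
    | succ x =>
      have h' : t.getD x true = false := by simpa [List.getD] using h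
      have := ih x h'
      simp only [List.set, pvCountFalse, List.count_cons]
      simp only [pvCountFalse] at this
      omega

-- the neighbor list Source B builds: [j for j in range(n) if j != node and adj[j][node] <= thr]
def pvNbrs (adj : List (List Int)) (thr : Int) (n : Nat) (node : Nat) : List Nat :=
  (List.range n).filter (fun j => j ≠ node ∧ pvAdjle adj thr j node)

-- the while-stack loop of Source B (stack head = top; extend(reversed(neighbors)) = nbrs ++ s)
def pvStackLoop (adj : List (List Int)) (thr : Int) (n : Nat)
    (v : List Bool) (g : List Nat) (stack : List Nat) : List Bool × List Nat :=
  match stack with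
  | [] => (v, g)
  | x :: s =>
    if h : v.getD x true = false then
      pvStackLoop adj thr n (v.set x true) (g ++ [x]) (pvNbrs adj thr n x ++ s)
    else
      pvStackLoop adj thr n v g s
termination_by (pvCountFalse v, stack.length)
decreasing_by
  · exact Prod.Lex.left _ _ (pvCountFalse_set_lt v x h)
  · exact Prod.Lex.right _ (Nat.lt_succ_self s.length)

def get_connected_groups_alt (peaks : List Int) (adj_mat : List (List Int)) (threshold : Int) : List (List Int) :=
  let n := peaks.length
  let st :=
    (List.range n).foldl
      (fun (st : List Bool × List (List Int)) start =>
        if st.1.getD start true = false then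
          let r := pvStackLoop adj_mat threshold n st.1 [] [start]
          (r.1, st.2 ++ [r.2.map (fun i => peaks.getD i 0)])
        else st)
      (List.replicate n false, [])
  st.2

-- ===== PRECONDITION & SPEC =====
-- Pre_ excludes inputs where adj_mat lacks an n×n prefix (n = len(peaks) ≥ 2): A reads
-- adj_mat[i][idx] for every off-diagonal pair and raises IndexError when a needed row or
-- entry is missing; the bound is conservative only on the last row's last entry, which
-- A never reads (see claim cites).
def Pre_get_connected_groups (peaks : List Int) (adj_mat : List (List Int)) (threshold : Int) : Prop :=
  peaks.length ≤ 1 ∨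
    (peaks.length ≤ adj_mat.length ∧
      ∀ row ∈ adj_mat.take peaks.length, peaks.length ≤ row.length)
instance (peaks : List Int) (adj_mat : List (List Int)) (threshold : Int) : Decidable (Pre_get_connected_groups peaks adj_mat threshold) := by unfold Pre_get_connected_groups; infer_instance

def pvWitness_get_connected_groups : List Int × List (List Int) × Int :=
  ([3, 7, 50], [[0, 1, 10], [1, 0, 10], [10, 10, 0]], 2)

def Spec_get_connected_groups (peaks : List Int) (adj_mat : List (List Int)) (threshold : Int) (out : List (List Int)) : Prop := out = get_connected_groups_alt peaks adj_mat threshold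
instance (peaks : List Int) (adj_mat : List (List Int)) (threshold : Int) (out : List (List Int)) : Decidable (Spec_get_connected_groups peaks adj_mat threshold out) := by unfold Spec_get_connected_groups; infer_instance

-- ===== CLAIM (what is proved, stated in full; the proofs are below) =====
def Claim_equal_get_connected_groups : Prop := ∀ (peaks : List Int) (adj_mat : List (List Int)) (threshold : Int), Dom_get_connected_groups peaks adj_mat threshold → Pre_get_connected_groups peaks adj_mat threshold → Spec_get_connected_groups peaks adj_mat threshold (get_connected_groups peaks adj_mat threshold)

-- ===== LEMMAS AND PROOFS =====

theorem pvCountFalse_pos (v : List Bool) (x : Nat) (h : v.getD x true = false) :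
    1 ≤ pvCountFalse v := by
  have := pvCountFalse_set_lt v x h
  omega

theorem pvCountFalse_set_le (v : List Bool) (x : Nat) :
    pvCountFalse (v.set x true) ≤ pvCountFalse v := by
  induction v generalizing x with
  | nil => simp
  | cons b t ih =>
    cases x with
    | zero =>
      cases b <;> simp [pvCountFalse]
    | succ x =>
      have := ih x
      simp only [List.set, pvCountFalse, List.count_cons]
      simp only [pvCountFalse] at this
      omega

theorem pvFoldl_inv {α β : Type} (F : β → α → β) (Inv : β → Prop)
    (hstep : ∀ b a, Inv b → Inv (F b a)) :
    ∀ (l : List α) (b : β), Inv b → Inv (l.foldl F b) := by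
  intro l
  induction l with
  | nil => intro b hb; simpa using hb
  | cons a t ih => intro b hb; exact ih _ (hstep b a hb)

-- pvDfsA never lengthens visited and never increases the number of unvisited entries
theorem pvDfsA_inv (adj : List (List Int)) (thr : Int) (n : Nat) :
    ∀ (f idx : Nat) (vg : List Bool × List Nat),
      (pvDfsA adj thr n f idx vg).1.length = vg.1.length ∧
      pvCountFalse (pvDfsA adj thr n f idx vg).1 ≤ pvCountFalse vg.1 := by
  intro f
  induction f with
  | zero => intro idx vg; simp [pvDfsA]
  | succ f ih =>
    intro idx vg
    simp only [pvDfsA]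
    have base₁ : (vg.1.set idx true, vg.2 ++ [idx]).1.length = vg.1.length := by
      simp
    have base₂ : pvCountFalse (vg.1.set idx true, vg.2 ++ [idx]).1 ≤ pvCountFalse vg.1 :=
      pvCountFalse_set_le vg.1 idx
    have := pvFoldl_inv
      (fun (vg' : List Bool × List Nat) i =>
        if i = idx then vg'
        else if pvAdjle adj thr i idx ∧ vg'.1.getD i true = false then
          pvDfsA adj thr n f i vg'
        else vg')
      (fun vg' => vg'.1.length = vg.1.length ∧ pvCountFalse vg'.1 ≤ pvCountFalse vg.1)
      (by
        intro b a hb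
        dsimp only
        split_ifs with h1 h2
        · exact hb
        · have := ih a b
          exact ⟨this.1.trans hb.1, this.2.trans hb.2⟩
        · exact hb)
      (List.range n) (vg.1.set idx true, vg.2 ++ [idx]) ⟨base₁, base₂⟩
    exact this

-- fold over range n with the skip-branches = fold over the filtered neighbor list
theorem pvFoldl_filter {α : Type} (p : Nat → Bool) (F G : α → Nat → α)
    (hskip : ∀ a i, p i = false → F a i = a)
    (hkeep : ∀ a i, p i = true → F a i = G a i) :
    ∀ (l : List Nat) (a : α), l.foldl F a = (l.filter p).foldl G a := by
  intro l
  induction l with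
  | nil => intro a; rfl
  | cons x t ih =>
    intro a
    by_cases h : p x = true
    · simp [List.filter, h, hkeep a x h, ih]
    · have h' : p x = false := by simpa using h
      simp [List.filter, h', hskip a x h', ih]

-- ★ main simulation: popping an unvisited node and running the stack loop equals
-- running A's recursive DFS on it and continuing with the rest of the stack
theorem pvMain (adj : List (List Int)) (thr : Int) (n : Nat) :
    ∀ (k : Nat) (v : List Bool) (g : List Nat) (f idx : Nat) (s : List Nat),
      pvCountFalse v ≤ k → pvCountFalse v ≤ f → v.getD idx true = false →
      pvStackLoop adj thr n v g (idx :: s)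
        = pvStackLoop adj thr n (pvDfsA adj thr n f idx (v, g)).1
            (pvDfsA adj thr n f idx (v, g)).2 s := by
  intro k
  induction k with
  | zero =>
    intro v g f idx s hk hf h
    have := pvCountFalse_pos v idx h
    omega
  | succ k ih =>
    intro v g f idx s hk hf h
    have hpos : 1 ≤ pvCountFalse v := pvCountFalse_pos v idx h
    obtain ⟨f', rfl⟩ : ∃ f', f = f' + 1 := ⟨f - 1, by omega⟩
    have hlt := pvCountFalse_set_lt v idx h
    -- the inner loop of _DFS_recurse, processed one stack element at a time
    have T : ∀ (ns : List Nat) (v : List Bool) (g : List Nat) (s : List Nat),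
        pvCountFalse v ≤ k → pvCountFalse v ≤ f' →
        pvStackLoop adj thr n v g (ns ++ s)
          = pvStackLoop adj thr n
              (ns.foldl (fun vg i => if vg.1.getD i true = false then pvDfsA adj thr n f' i vg else vg) (v, g)).1
              (ns.foldl (fun vg i => if vg.1.getD i true = false then pvDfsA adj thr n f' i vg else vg) (v, g)).2 s := by
      intro ns
      induction ns with
      | nil => intro v g s _ _; rfl
      | cons i t iht =>
        intro v g s hk' hf'
        by_cases hv : v.getD i true = false
        · have hstep := ih v g f' i (t ++ s) hk' hf' hv
          have hinv := pvDfsA_inv adj thr n f' i (v, g)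
          have := iht (pvDfsA adj thr n f' i (v, g)).1 (pvDfsA adj thr n f' i (v, g)).2 s
            (le_trans hinv.2 hk') (le_trans hinv.2 hf')
          calc pvStackLoop adj thr n v g ((i :: t) ++ s)
              = pvStackLoop adj thr n v g (i :: (t ++ s)) := rfl
            _ = pvStackLoop adj thr n (pvDfsA adj thr n f' i (v, g)).1
                  (pvDfsA adj thr n f' i (v, g)).2 (t ++ s) := hstep
            _ = _ := by
                  rw [this]
                  simp only [List.foldl_cons, if_pos hv]
        · have hskip : pvStackLoop adj thr n v g ((i :: t) ++ s)
              = pvStackLoop adj thr n v g (t ++ s) := by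
            rw [List.cons_append, pvStackLoop, dif_neg hv]
          rw [hskip, iht v g s hk' hf']
          simp only [List.foldl_cons, if_neg hv]
    -- unfold one pop of the stack loop and one level of the recursion
    rw [pvStackLoop, dif_pos h]
    simp only [pvDfsA]
    rw [pvFoldl_filter (fun j => decide (j ≠ idx) && pvAdjle adj thr j idx)
          (fun vg i => if i = idx then vg
            else if pvAdjle adj thr i idx ∧ vg.1.getD i true = false then pvDfsA adj thr n f' i vg
            else vg)
          (fun vg i => if vg.1.getD i true = false then pvDfsA adj thr n f' i vg else vg)
          ?hskip ?hkeep (List.range n) (v.set idx true, g ++ [idx])]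
    case hskip =>
      intro a i hp
      dsimp only at hp ⊢
      by_cases hi : i = idx
      · simp [hi]
      · have hne : decide (i ≠ idx) = true := by simp [hi]
        have hadj : pvAdjle adj thr i idx = false := by
          cases hA : pvAdjle adj thr i idx
          · rfl
          · rw [hne, hA] at hp; cases hp
        simp [hi, hadj]
    case hkeep =>
      intro a i hp
      dsimp only at hp ⊢
      simp only [Bool.and_eq_true, decide_eq_true_eq] at hp
      rw [if_neg hp.1]
      by_cases hv : a.1.getD i true = false
      · rw [if_pos ⟨hp.2, hv⟩, if_pos hv]
      · rw [if_neg (by intro hc; exact hv hc.2), if_neg hv]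
    have := T (pvNbrs adj thr n idx) (v.set idx true) (g ++ [idx]) s
      (by omega) (by omega)
    simpa [pvNbrs] using this

-- ===== VERDICT (by name: the statement is the Claim_ definition above) =====
-- outer loop correspondence: same visited vector, B's groups = A's index groups mapped to peaks
theorem pvOuter (peaks : List Int) (adj : List (List Int)) (thr : Int) :
    ∀ (l : List Nat) (v : List Bool) (accI : List (List Nat)),
      pvCountFalse v ≤ peaks.length →
      l.foldl
        (fun (st : List Bool × List (List Int)) start =>
          if st.1.getD start true = false then
            ((pvStackLoop adj thr peaks.length st.1 [] [start]).1,
             st.2 ++ [(pvStackLoop adj thr peaks.length st.1 [] [start]).2.map (fun i => peaks.getD i 0)])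
          else st)
        (v, accI.map (fun grp => grp.map (fun i => peaks.getD i 0)))
      = ((l.foldl
            (fun (st : List Bool × List (List Nat)) i =>
              if st.1.getD i true = false then
                ((pvDfsA adj thr peaks.length (peaks.length + 1) i (st.1, [])).1,
                 st.2 ++ [(pvDfsA adj thr peaks.length (peaks.length + 1) i (st.1, [])).2])
              else st)
            (v, accI)).1,
         (l.foldl
            (fun (st : List Bool × List (List Nat)) i =>
              if st.1.getD i true = false then
                ((pvDfsA adj thr peaks.length (peaks.length + 1) i (st.1, [])).1,
                 st.2 ++ [(pvDfsA adj thr peaks.length (peaks.length + 1) i (st.1, [])).2])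
              else st)
            (v, accI)).2.map (fun grp => grp.map (fun i => peaks.getD i 0))) := by
  intro l
  induction l with
  | nil => intro v accI _; rfl
  | cons i t ih =>
    intro v accI hv
    simp only [List.foldl_cons]
    by_cases h : v.getD i true = false
    · have key := pvMain adj thr peaks.length (pvCountFalse v) v [] (peaks.length + 1) i []
        le_rfl (by omega) h
      have base : pvStackLoop adj thr peaks.length
          (pvDfsA adj thr peaks.length (peaks.length + 1) i (v, [])).1
          (pvDfsA adj thr peaks.length (peaks.length + 1) i (v, [])).2 []
          = ((pvDfsA adj thr peaks.length (peaks.length + 1) i (v, [])).1,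
             (pvDfsA adj thr peaks.length (peaks.length + 1) i (v, [])).2) := by
        rw [pvStackLoop]
      rw [if_pos h, if_pos h, key, base]
      have hinv := pvDfsA_inv adj thr peaks.length (peaks.length + 1) i (v, [])
      have := ih (pvDfsA adj thr peaks.length (peaks.length + 1) i (v, [])).1
        (accI ++ [(pvDfsA adj thr peaks.length (peaks.length + 1) i (v, [])).2])
        (le_trans hinv.2 hv)
      simpa using this
    · rw [if_neg h, if_neg h]
      exact ih v accI hv

theorem get_connected_groups_spec : Claim_equal_get_connected_groups := by
  intro peaks adj thr _ _
  show get_connected_groups peaks adj thr = get_connected_groups_alt peaks adj thr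
  have h0 : pvCountFalse (List.replicate peaks.length false) ≤ peaks.length := by
    simp [pvCountFalse]
  have := pvOuter peaks adj thr (List.range peaks.length)
    (List.replicate peaks.length false) [] h0
  simp only [List.map_nil] at this
  simp only [get_connected_groups, get_connected_groups_alt]
  rw [this]
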